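-- pv_equiv track=rewrite | github.com/yxhpy/ui_easy | src/core/requirement_analyzer/analyzer.py | _extract_overview_fallback
-- ===== SOURCE A (Python) =====
-- from typing import Dict, Any, List, Optional, Tuple
--
-- def _extract_overview_fallback(response: str) -> Tuple[str, str]:
--     """Fallback method to extract overview from unstructured response"""
--     lines = response.split('\n')
--     overview = ""
--     audience = ""
--
--     for line in lines:
--         line = line.strip()
--         if 'overview' in line.lower() or 'project' in line.lower():
--             overview = line
--         elif 'audience' in line.lower() or 'user' in line.lower():
--             audience = line
--
--     return overview, audience
-- ===== SOURCE B (Python) =====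
-- def _extract_overview_fallback(response: str) -> "Tuple[str, str]":
--     """Scan the lines in reverse and keep the first match of each kind,
--     breaking as soon as both are found (the last matches in forward order)."""
--     overview = None
--     audience = None
--     for raw in reversed(response.split('\n')):
--         line = raw.strip()
--         low = line.lower()
--         ov_match = 'overview' in low or 'project' in low
--         if overview is None and ov_match:
--             overview = line
--         elif audience is None and ('audience' in low or 'user' in low) and not ov_match:
--             audience = line
--         if overview is not None and audience is not None:
--             break
--     return (overview if overview is not None else "",
--             audience if audience is not None else "")
-- ===== Notes on version B (the rewrite author's own statement) =====
-- stated objective: alternative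
-- what changed: B scans the lines in reverse with two fill-once slots and an early break once both are found, instead of A's forward loop that overwrites both slots on every later match.
import Mathlib
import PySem

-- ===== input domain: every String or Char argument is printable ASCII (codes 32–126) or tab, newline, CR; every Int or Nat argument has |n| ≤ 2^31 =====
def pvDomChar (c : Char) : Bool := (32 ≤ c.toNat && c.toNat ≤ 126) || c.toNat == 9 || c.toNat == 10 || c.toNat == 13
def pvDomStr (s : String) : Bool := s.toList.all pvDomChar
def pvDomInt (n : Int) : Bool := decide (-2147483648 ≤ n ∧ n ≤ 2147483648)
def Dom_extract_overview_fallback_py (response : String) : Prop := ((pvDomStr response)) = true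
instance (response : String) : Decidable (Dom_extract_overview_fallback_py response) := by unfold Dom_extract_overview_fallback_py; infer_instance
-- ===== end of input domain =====

-- B scans the lines in reverse with two fill-once slots and an early break, instead of A's
-- forward loop that overwrites both slots on every later match; equal return value proved.


-- shared condition helpers ('overview'/'project' match, 'audience'/'user' match, on a stripped line)
def pvOvMatch (line : String) : Bool :=
  PySem.Str.isIn "overview" (PySem.Str.lower line) || PySem.Str.isIn "project" (PySem.Str.lower line)
def pvAuMatch (line : String) : Bool :=
  PySem.Str.isIn "audience" (PySem.Str.lower line) || PySem.Str.isIn "user" (PySem.Str.lower line)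

-- ===== PORT A =====
-- loop body of A: overwrite the matching slot (audience only on the elif)
def pvStepA (st : String × String) (raw : String) : String × String :=
  let line := PySem.Str.strip raw
  if pvOvMatch line then (line, st.2)
  else if pvAuMatch line then (st.1, line)
  else st

def extract_overview_fallback_py (response : String) : String × String :=
  -- split? is always some for the nonempty separator "\n"; getD [] is unreachable
  let lines := (PySem.Str.split? response "\n").getD []
  lines.foldl pvStepA ("", "")

-- ===== PORT B =====
-- reverse loop of Source B: fill each slot once, break when both are filled
def pvGoRev : List String → Option String → Option String → String × String
  | [], ov, au => (ov.getD "", au.getD "")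
  | raw :: rest, ov, au =>
    let line := PySem.Str.strip raw
    let ovM := pvOvMatch line
    let ov' := if ov.isNone && ovM then some line else ov
    let au' := if ov.isNone && ovM then au
               else if au.isNone && pvAuMatch line && !ovM then some line else au
    if ov'.isSome && au'.isSome then (ov'.getD "", au'.getD "")
    else pvGoRev rest ov' au'

def extract_overview_fallback_py_alt (response : String) : String × String :=
  pvGoRev ((PySem.Str.split? response "\n").getD []).reverse none none

-- ===== PRECONDITION & SPEC =====
def Spec_extract_overview_fallback_py (response : String) (out : String × String) : Prop := out = extract_overview_fallback_py_alt response
instance (response : String) (out : String × String) : Decidable (Spec_extract_overview_fallback_py response out) := by unfold Spec_extract_overview_fallback_py; infer_instance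

-- ===== CLAIM (what is proved, stated in full; the proofs are below) =====
def Claim_equal_extract_overview_fallback_py : Prop := ∀ (response : String), Dom_extract_overview_fallback_py response → Spec_extract_overview_fallback_py response (extract_overview_fallback_py response)

-- ===== LEMMAS AND PROOFS =====

-- the effective audience condition: the elif fires only when the overview condition is false
def pvQ (line : String) : Bool := !pvOvMatch line && pvAuMatch line

theorem pv_map_or_getD {α β : Type} (o t : Option α) (f : α → β) (d : β) :
    ((o.or t).map f).getD d = (o.map f).getD ((t.map f).getD d) := by cases o <;> simp

-- A's foldl keeps, in each component, the last matching stripped line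
theorem pvStepA_eq (st : String × String) (raw : String) :
    pvStepA st raw = (if pvOvMatch (PySem.Str.strip raw) then PySem.Str.strip raw else st.1,
                      if pvQ (PySem.Str.strip raw) then PySem.Str.strip raw else st.2) := by
  unfold pvStepA pvQ
  by_cases hp : pvOvMatch (PySem.Str.strip raw) <;>
    by_cases hq : pvAuMatch (PySem.Str.strip raw) <;> simp [hp, hq]

theorem pv_foldA (l : List String) (ov au : String) :
    l.foldl pvStepA (ov, au)
    = (((l.reverse.find? (fun r => pvOvMatch (PySem.Str.strip r))).map PySem.Str.strip).getD ov,
       ((l.reverse.find? (fun r => pvQ (PySem.Str.strip r))).map PySem.Str.strip).getD au) := by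
  induction l generalizing ov au with
  | nil => simp
  | cons x xs ih =>
      simp only [List.foldl_cons, pvStepA_eq, List.reverse_cons, List.find?_append,
        List.find?_cons, List.find?_nil]
      rw [ih]
      by_cases hp : pvOvMatch (PySem.Str.strip x) <;>
        by_cases hq : pvQ (PySem.Str.strip x) <;>
          simp [pv_map_or_getD, hp, hq]

-- B's reverse loop returns the first matching stripped line for each slot
theorem pv_goRev (l : List String) (ov au : Option String) :
    pvGoRev l ov au
    = ((ov.or ((l.find? (fun r => pvOvMatch (PySem.Str.strip r))).map PySem.Str.strip)).getD "",
       (au.or ((l.find? (fun r => pvQ (PySem.Str.strip r))).map PySem.Str.strip)).getD "") := by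
  induction l generalizing ov au with
  | nil => simp [pvGoRev]
  | cons x xs ih =>
      by_cases hp : pvOvMatch (PySem.Str.strip x) <;>
        by_cases hq : pvAuMatch (PySem.Str.strip x) <;>
          cases ov <;> cases au <;>
            simp [pvGoRev, List.find?_cons, pvQ, hp, hq, ih]

-- ===== VERDICT (by name: the statement is the Claim_ definition above) =====
theorem extract_overview_fallback_py_spec : Claim_equal_extract_overview_fallback_py := by
  intro response _
  unfold Spec_extract_overview_fallback_py extract_overview_fallback_py extract_overview_fallback_py_alt
  rw [pv_goRev, pv_foldA]
  simp
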